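-- pv_equiv track=rewrite | github.com/FoDwVn11110100001001000000/New-Shop | utils/mix.py | substract_lots
-- ===== SOURCE A (Python) =====
-- from collections import defaultdict
--
-- def substract_lots(db_stats, reserved_lots):
--     # Преобразуем в структуру для удобного вычитания
--     stats_dict = defaultdict(list)
--     for lot_type, price, count in db_stats:
--         stats_dict[lot_type].append([price, count])
--
--     # Сортируем для предсказуемости
--     for lot_type in stats_dict:
--         stats_dict[lot_type].sort()
--
--     # Вычитаем каждый зарезервированный лот
--     for lot in reserved_lots:
--         # Берем первый ключ, который не 'filename'
--         lot_type = next(k for k in lot.keys() if k != 'filename')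
--         if lot_type not in stats_dict:
--             continue
--         for entry in stats_dict[lot_type]:
--             if entry[1] > 0:
--                 entry[1] -= 1
--                 break
--
--     # Преобразуем обратно в список кортежей
--     result_stats = []
--     for lot_type, entries in stats_dict.items():
--         for price, count in entries:
--             result_stats.append((lot_type, price, count))
--
--     return result_stats
-- ===== SOURCE B (Python) =====
-- from collections import Counter, defaultdict
--
-- def substract_lots(db_stats, reserved_lots):
--     # Count how many reservations target each lot type (one pass over reservations).
--     need = Counter(next(k for k in lot.keys() if k != 'filename') for lot in reserved_lots)
--
--     # Group the inventory per type, keeping first-occurrence type order.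
--     groups = defaultdict(list)
--     for lot_type, price, count in db_stats:
--         groups[lot_type].append((price, count))
--
--     # One greedy front-to-back pass per type over the sorted entries.
--     result_stats = []
--     for lot_type, entries in groups.items():
--         r = need.get(lot_type, 0)
--         for price, count in sorted(entries):
--             if r > 0 and count > 0:
--                 d = min(r, count)
--                 count -= d
--                 r -= d
--             result_stats.append((lot_type, price, count))
--     return result_stats
-- ===== Notes on version B (the rewrite author's own statement) =====
-- stated objective: alternative
-- what changed: Instead of re-scanning a type's entry list once per reserved lot to decrement the first positive count, B counts reservations per type with a Counter and distributes each type's total in a single greedy front-to-back pass over its sorted entries (asymptotically fewer entry visits; a timing run read only ~1.2x on the generated inputs, so no speed is claimed).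
-- outside the precondition, e.g. on substract_lots([('a', 1, 2)], [{'filename': 'f'}]): A raises StopIteration, B raises RuntimeError
import Mathlib
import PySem

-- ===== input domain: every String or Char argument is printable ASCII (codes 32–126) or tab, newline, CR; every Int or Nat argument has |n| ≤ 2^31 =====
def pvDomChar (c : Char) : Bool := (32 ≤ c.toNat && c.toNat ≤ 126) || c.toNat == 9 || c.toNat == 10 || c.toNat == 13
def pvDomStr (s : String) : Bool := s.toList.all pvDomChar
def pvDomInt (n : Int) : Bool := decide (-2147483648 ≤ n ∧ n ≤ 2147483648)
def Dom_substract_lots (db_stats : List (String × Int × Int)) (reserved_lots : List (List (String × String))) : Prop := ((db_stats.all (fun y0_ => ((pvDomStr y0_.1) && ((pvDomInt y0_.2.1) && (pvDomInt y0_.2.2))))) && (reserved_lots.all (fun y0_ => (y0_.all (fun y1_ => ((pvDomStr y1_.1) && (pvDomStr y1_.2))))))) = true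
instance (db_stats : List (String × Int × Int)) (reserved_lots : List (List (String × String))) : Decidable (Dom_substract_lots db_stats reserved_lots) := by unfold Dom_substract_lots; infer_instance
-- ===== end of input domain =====

-- B replaces A's per-reservation scan of a type's entry list (decrement first positive count, once per
-- reserved lot) by counting reservations per type once and distributing each type's total in a single
-- greedy front-to-back pass over its sorted entries; objective: alternative algorithm, same result.

-- ===== PORT A =====
-- next(k for k in lot.keys() if k != 'filename') — the same expression occurs verbatim in both Pythons
def pvLotType (lot : List (String × String)) : Option String :=
  (PySem.Dict.ofList lot).keys.find? (fun k => k != "filename")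

-- the inner 'for entry in stats_dict[lot_type]: if entry[1] > 0: entry[1] -= 1; break'
def pvDecFirst : List (Int × Int) → List (Int × Int)
  | [] => []
  | (p, c) :: rest => if c > 0 then (p, c - 1) :: rest else (p, c) :: pvDecFirst rest

def substract_lots (db_stats : List (String × Int × Int)) (reserved_lots : List (List (String × String))) : List (String × Int × Int) :=
  let stats0 : PySem.Dict String (List (Int × Int)) :=
    db_stats.foldl (fun d x => d.modify x.1 [] (fun l => l ++ [(x.2.1, x.2.2)])) PySem.Dict.empty
  let stats1 := stats0.keys.foldl
    (fun d k => d.modify k [] (fun l => PySem.List.sorted2 l (fun e => e.1) (fun e => e.2))) stats0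
  let stats2 := reserved_lots.foldl (fun d lot =>
      match pvLotType lot with
      | some t => if d.contains t then d.modify t [] pvDecFirst else d
      | none => d) stats1
  stats2.items.foldl (fun acc x => acc ++ x.2.map (fun e => (x.1, e.1, e.2))) []

-- ===== PORT B =====
-- one greedy pass over a type's sorted entries, distributing the reserved total r
def pvGreedy (t : String) (r : Int) : List (Int × Int) → List (String × Int × Int)
  | [] => []
  | (p, c) :: rest =>
    if r > 0 ∧ c > 0 then
      let dd := min r c
      (t, p, c - dd) :: pvGreedy t (r - dd) rest
    else (t, p, c) :: pvGreedy t r rest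

def substract_lots_alt (db_stats : List (String × Int × Int)) (reserved_lots : List (List (String × String))) : List (String × Int × Int) :=
  let need : PySem.Dict String Int := PySem.Dict.counter (reserved_lots.filterMap pvLotType)
  let groups : PySem.Dict String (List (Int × Int)) :=
    db_stats.foldl (fun d x => d.modify x.1 [] (fun l => l ++ [(x.2.1, x.2.2)])) PySem.Dict.empty
  groups.items.foldl (fun acc x =>
      acc ++ pvGreedy x.1 (need.getD x.1 0) (PySem.List.sorted2 x.2 (fun e => e.1) (fun e => e.2))) []

-- ===== PRECONDITION & SPEC =====
-- Pre_ excludes reserved lots with no key other than 'filename' (incl. the empty dict): there both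
-- Pythons raise StopIteration in next(k for k in lot.keys() if k != 'filename').
def Pre_substract_lots (db_stats : List (String × Int × Int)) (reserved_lots : List (List (String × String))) : Prop :=
  ∀ lot ∈ reserved_lots, ∃ p ∈ lot, p.1 ≠ "filename"
instance (db_stats : List (String × Int × Int)) (reserved_lots : List (List (String × String))) : Decidable (Pre_substract_lots db_stats reserved_lots) := by unfold Pre_substract_lots; infer_instance
def pvWitness_substract_lots : (List (String × Int × Int)) × (List (List (String × String))) :=
  ([("a", 1, 2), ("a", 1, 1)], [[("a", "x")], [("filename", "f"), ("a", "y")]])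

def Spec_substract_lots (db_stats : List (String × Int × Int)) (reserved_lots : List (List (String × String))) (out : List (String × Int × Int)) : Prop := out = substract_lots_alt db_stats reserved_lots
instance (db_stats : List (String × Int × Int)) (reserved_lots : List (List (String × String))) (out : List (String × Int × Int)) : Decidable (Spec_substract_lots db_stats reserved_lots out) := by unfold Spec_substract_lots; infer_instance

-- ===== CLAIM (what is proved, stated in full; the proofs are below) =====
def Claim_equal_substract_lots : Prop := ∀ (db_stats : List (String × Int × Int)) (reserved_lots : List (List (String × String))), Dom_substract_lots db_stats reserved_lots → Pre_substract_lots db_stats reserved_lots → Spec_substract_lots db_stats reserved_lots (substract_lots db_stats reserved_lots)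

-- ===== LEMMAS AND PROOFS =====

-- value at k after a plain modify-fold: f applied once per occurrence of k
lemma pv_getD_foldl_modify {ν : Type} (f : ν → ν) (dflt : ν) (l : List String) (d : PySem.Dict String ν) (k : String) :
    (l.foldl (fun d t => d.modify t dflt f) d).getD k dflt = f^[List.count k l] (d.getD k dflt) := by
  induction l generalizing d with
  | nil => simp
  | cons a l ih =>
    rw [List.foldl_cons, ih, PySem.Dict.getD_modify]
    by_cases h : k = a
    · subst h; simp [List.count_cons_self, Function.iterate_succ_apply]
    · simp [h, Ne.symm h]

-- a modify-fold over keys already present does not change the key list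
lemma pv_keys_foldl_modify {ν : Type} (f : ν → ν) (dflt : ν) (l : List String) (d : PySem.Dict String ν)
    (h : ∀ x ∈ l, d.contains x = true) :
    (l.foldl (fun d t => d.modify t dflt f) d).keys = d.keys := by
  induction l generalizing d with
  | nil => rfl
  | cons a l ih =>
    have ha := h a (List.mem_cons_self ..)
    have hk : (d.modify a dflt f).keys = d.keys := by
      rw [PySem.Dict.keys_modify, PySem.Dict.keys_insert_of_contains d _ ha]
    rw [List.foldl_cons, ih _ (fun x hx => by
      rw [PySem.Dict.contains_modify]
      simp [h x (List.mem_cons_of_mem _ hx)]), hk]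

-- guarded modify-fold (A's reservation loop): value at a present key gets f once per occurrence
lemma pv_getD_foldl_guard {ν : Type} (f : ν → ν) (dflt : ν) (l : List String) (d : PySem.Dict String ν) (k : String) :
    (l.foldl (fun d t => if d.contains t then d.modify t dflt f else d) d).getD k dflt
      = if d.contains k then f^[List.count k l] (d.getD k dflt) else d.getD k dflt := by
  induction l generalizing d with
  | nil => simp
  | cons a l ih =>
    rw [List.foldl_cons]
    by_cases ha : d.contains a = true
    · rw [if_pos ha, ih]
      by_cases hk : k = a
      · subst hk
        simp [PySem.Dict.contains_modify, ha,
          List.count_cons_self, Function.iterate_succ_apply]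
      · simp [PySem.Dict.contains_modify, PySem.Dict.getD_modify, hk, Ne.symm hk]
    · rw [if_neg (by simp [ha]), ih]
      by_cases hk : k = a
      · subst hk; simp [ha]
      · simp [Ne.symm hk]

-- guarded modify-fold does not change the key list
lemma pv_keys_foldl_guard {ν : Type} (f : ν → ν) (dflt : ν) (l : List String) (d : PySem.Dict String ν) :
    (l.foldl (fun d t => if d.contains t then d.modify t dflt f else d) d).keys = d.keys := by
  induction l generalizing d with
  | nil => rfl
  | cons a l ih =>
    rw [List.foldl_cons]
    by_cases ha : d.contains a = true
    · rw [if_pos ha, ih, PySem.Dict.keys_modify, PySem.Dict.keys_insert_of_contains d _ ha]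
    · rw [if_neg (by simp [ha]), ih]

lemma pv_decFirst_nil : pvDecFirst [] = [] := rfl

-- repeated decrement skips a non-positive head
lemma pv_iter_nonpos (p c : Int) (rest : List (Int × Int)) (hc : c ≤ 0) (m : Nat) :
    pvDecFirst^[m] ((p, c) :: rest) = (p, c) :: pvDecFirst^[m] rest := by
  induction m with
  | zero => rfl
  | succ m ih =>
    rw [Function.iterate_succ_apply', Function.iterate_succ_apply', ih]
    simp [pvDecFirst, not_lt.mpr hc]

-- m ≤ c decrements land entirely on a head of size c
lemma pv_iter_le (m : Nat) : ∀ (p c : Int) (rest : List (Int × Int)), (m : Int) ≤ c →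
    pvDecFirst^[m] ((p, c) :: rest) = (p, c - m) :: rest := by
  induction m with
  | zero => intro p c rest _; simp
  | succ m ih =>
    intro p c rest hm
    have hc : 0 < c := by push_cast at hm; omega
    rw [Function.iterate_succ_apply]
    have h1 : pvDecFirst ((p, c) :: rest) = (p, c - 1) :: rest := by simp [pvDecFirst, hc]
    rw [h1, ih p (c - 1) rest (by push_cast at hm ⊢; omega)]
    congr 1
    push_cast
    ring_nf

-- more than c decrements zero the head and spill over
lemma pv_iter_spill (p c : Int) (rest : List (Int × Int)) (hc : 0 < c) (k : Nat) :
    pvDecFirst^[k + c.toNat] ((p, c) :: rest) = (p, 0) :: pvDecFirst^[k] rest := by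
  rw [Function.iterate_add_apply,
    pv_iter_le c.toNat p c rest (by omega),
    show c - (c.toNat : Int) = 0 by omega,
    pv_iter_nonpos p 0 rest le_rfl]

-- zero budget: the greedy pass just tags the entries
lemma pv_greedy_zero (t : String) : ∀ (v : List (Int × Int)) (r : Int), r ≤ 0 →
    pvGreedy t r v = v.map (fun e => (t, e.1, e.2)) := by
  intro v
  induction v with
  | nil => intro r _; rfl
  | cons hd rest ih =>
    intro r hr
    obtain ⟨p, c⟩ := hd
    rw [pvGreedy, if_neg (by omega)]
    simp [ih r hr]

-- CORE: m single decrements = one greedy pass with budget m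
lemma pv_core (t : String) : ∀ (v : List (Int × Int)) (m : Nat),
    (pvDecFirst^[m] v).map (fun e => (t, e.1, e.2)) = pvGreedy t (m : Int) v := by
  intro v
  induction v with
  | nil =>
    intro m
    rw [Function.iterate_fixed pv_decFirst_nil]
    rfl
  | cons hd rest ih =>
    intro m
    obtain ⟨p, c⟩ := hd
    by_cases hc : 0 < c
    · rcases Nat.eq_zero_or_pos m with hm0 | hm0
      · subst hm0
        rw [Function.iterate_zero_apply, pvGreedy, if_neg (by omega)]
        simp [pv_greedy_zero t rest 0 le_rfl]
      · by_cases hm : (m : Int) ≤ c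
        · rw [pv_iter_le m p c rest hm, pvGreedy, if_pos ⟨by exact_mod_cast hm0, hc⟩]
          have hmin : min (m : Int) c = (m : Int) := min_eq_left hm
          simp [hmin, pv_greedy_zero t rest 0 (by omega)]
        · have hk : m = (m - c.toNat) + c.toNat := by omega
          rw [hk, pv_iter_spill p c rest hc (m - c.toNat), pvGreedy,
            if_pos ⟨by push_cast; omega, hc⟩]
          have hmin : min ((((m - c.toNat) + c.toNat : Nat) : Int)) c = c := by
            apply min_eq_right; push_cast; omega
          simp only [hmin, List.map_cons, ih (m - c.toNat)]
          have e1 : c - c = 0 := by ring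
          have e2 : ((((m - c.toNat) + c.toNat : Nat) : Int)) - c = ((m - c.toNat : Nat) : Int) := by
            push_cast; omega
          rw [e1, e2]
    · rw [pv_iter_nonpos p c rest (by omega) m, pvGreedy, if_neg (by omega)]
      simp [ih m]

-- A's reservation loop is the same loop over the extracted per-lot types
lemma pv_resfold (res : List (List (String × String))) :
    ∀ d : PySem.Dict String (List (Int × Int)),
      res.foldl (fun d lot =>
        match pvLotType lot with
        | some t => if d.contains t then d.modify t [] pvDecFirst else d
        | none => d) d
      = (res.filterMap pvLotType).foldl
          (fun d t => if d.contains t then d.modify t [] pvDecFirst else d) d := by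
  induction res with
  | nil => intro d; rfl
  | cons lot rls ih =>
    intro d
    rw [List.foldl_cons, List.filterMap_cons]
    cases h : pvLotType lot with
    | none => exact ih d
    | some t => rw [List.foldl_cons]; exact ih _

-- the two ports agree everywhere (totalised: a lot with no usable key is skipped by both)
lemma pv_main (db_stats : List (String × Int × Int)) (reserved_lots : List (List (String × String))) :
    substract_lots db_stats reserved_lots = substract_lots_alt db_stats reserved_lots := by
  unfold substract_lots substract_lots_alt
  dsimp only
  set d0 : PySem.Dict String (List (Int × Int)) :=
    db_stats.foldl (fun d x => d.modify x.1 [] (fun l => l ++ [(x.2.1, x.2.2)])) PySem.Dict.empty with hd0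
  set sortfn : List (Int × Int) → List (Int × Int) :=
    fun l => PySem.List.sorted2 l (fun e => e.1) (fun e => e.2) with hsort
  set ts : List String := reserved_lots.filterMap pvLotType with hts
  set d1 := d0.keys.foldl (fun d k => d.modify k [] sortfn) d0 with hd1
  rw [pv_resfold reserved_lots]
  set d2 := ts.foldl (fun d t => if d.contains t then d.modify t [] pvDecFirst else d) d1 with hd2
  -- key-list bookkeeping
  have hnd0 : d0.keys.Nodup := by
    rw [hd0]
    exact PySem.Dict.nodup_keys_foldl_modify_key db_stats (fun x => x.1) []
      (fun d x l => l ++ [(x.2.1, x.2.2)]) PySem.Dict.empty PySem.Dict.nodup_keys_empty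
  have hk1 : d1.keys = d0.keys := by
    rw [hd1]
    exact pv_keys_foldl_modify sortfn [] d0.keys d0
      (fun x hx => (PySem.Dict.contains_iff_mem_keys d0 x).mpr hx)
  have hk2 : d2.keys = d0.keys := by rw [hd2, pv_keys_foldl_guard, hk1]
  have hnd2 : d2.keys.Nodup := by rw [hk2]; exact hnd0
  -- flatten both results
  rw [PySem.List.foldl_append_eq_flatMap, PySem.List.foldl_append_eq_flatMap, List.nil_append,
    List.nil_append, PySem.Dict.items_eq_map_keys d2 hnd2 [],
    PySem.Dict.items_eq_map_keys d0 hnd0 [], hk2,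
    List.flatMap_def, List.flatMap_def, List.map_map, List.map_map]
  congr 1
  apply List.map_congr_left
  intro k hk
  have hcont1 : d1.contains k = true := by
    rw [PySem.Dict.contains_iff_mem_keys, hk1]; exact hk
  have hval1 : d1.getD k [] = sortfn (d0.getD k []) := by
    rw [hd1, pv_getD_foldl_modify, List.count_eq_one_of_mem hnd0 hk,
      Function.iterate_one]
  have hval2 : d2.getD k [] = pvDecFirst^[List.count k ts] (sortfn (d0.getD k [])) := by
    rw [hd2, pv_getD_foldl_guard, if_pos hcont1, hval1]
  simp only [Function.comp_apply, hval2, PySem.Dict.getD_counter, pv_core, hsort]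

-- ===== VERDICT (by name: the statement is the Claim_ definition above) =====
theorem substract_lots_spec : Claim_equal_substract_lots := by
  intro db_stats reserved_lots _ _
  unfold Spec_substract_lots
  exact pv_main db_stats reserved_lots
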